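-- pv_equiv track=rewrite | github.com/histausse/ph0wn_2021_lost_legacy | cipher.py | proc3
-- ===== SOURCE A (Python) =====
-- def proc3(a:int):
--     w3 = 1
--     w2 = 1
--     w4 = a & 255
--     while (w2 <= w4):
--         w3 *= 3
--         while (w3 > 256):
--             w3 -= 257
--         w2 += 1
--     return w3 & 255
-- ===== SOURCE B (Python) =====
-- def proc3(a: int):
--     e = a & 255
--     return pow(3, e, 257) & 255
-- ===== Notes on version B (the rewrite author's own statement) =====
-- stated objective: simpler
-- what changed: Replaced the repeated multiply-and-subtract loop (multiply by three, reduce below the prime modulus by repeated subtraction, once per exponent step) with Python's built-in three-argument modular exponentiation on the low byte of the argument, masked back to a byte.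
import Mathlib
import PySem

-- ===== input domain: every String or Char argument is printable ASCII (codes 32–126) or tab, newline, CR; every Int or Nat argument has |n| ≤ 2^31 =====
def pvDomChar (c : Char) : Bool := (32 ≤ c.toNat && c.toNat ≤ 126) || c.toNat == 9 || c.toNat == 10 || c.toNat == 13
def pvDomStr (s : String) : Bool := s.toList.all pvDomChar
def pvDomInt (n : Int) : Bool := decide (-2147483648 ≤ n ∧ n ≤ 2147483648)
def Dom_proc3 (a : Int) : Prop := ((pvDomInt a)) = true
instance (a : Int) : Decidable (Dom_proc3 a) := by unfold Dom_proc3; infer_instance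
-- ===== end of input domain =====

-- B replaces A's repeated multiply-and-subtract loop by built-in modular exponentiation
-- pow(3, a & 255, 257) masked to a byte: simpler, same value for every int a.


-- ===== PORT A =====
-- inner 'while w3 > 256: w3 -= 257'; fuel w3.toNat suffices since each pass subtracts 257
def proc3Inner : Nat → Int → Int
  | 0, w3 => w3
  | fuel + 1, w3 => if w3 > 256 then proc3Inner fuel (w3 - 257) else w3

-- outer 'while w2 <= w4' runs exactly w4.toNat times (w2 counts 1,2,…); fuel = remaining iterations
def proc3Outer : Nat → Int → Int
  | 0, w3 => w3
  | n + 1, w3 => proc3Outer n (proc3Inner (w3 * 3).toNat (w3 * 3))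

def proc3 (a : Int) : Int :=
  let w4 : Int := PySem.Int.band a 255
  PySem.Int.band (proc3Outer w4.toNat 1) 255

-- ===== PORT B =====
def proc3_alt (a : Int) : Int :=
  let e : Int := PySem.Int.band a 255
  PySem.Int.band (PySem.Int.powMod 3 e.toNat 257) 255

-- ===== PRECONDITION & SPEC =====
def Spec_proc3 (a : Int) (out : Int) : Prop := out = proc3_alt a
instance (a : Int) (out : Int) : Decidable (Spec_proc3 a out) := by unfold Spec_proc3; infer_instance

-- ===== CLAIM (what is proved, stated in full; the proofs are below) =====
def Claim_equal_proc3 : Prop := ∀ (a : Int), Dom_proc3 a → Spec_proc3 a (proc3 a)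

-- ===== LEMMAS AND PROOFS =====
-- a & 255 is a byte value
theorem band255_bounds (a : Int) : 0 ≤ PySem.Int.band a 255 ∧ PySem.Int.band a 255 ≤ 255 := by
  unfold PySem.Int.band
  split_ifs with h1 h2 h2
  · have e255 : (255 : Int).toNat = 255 := rfl
    have := Nat.and_le_right (n := a.toNat) (m := 255)
    rw [e255]
    constructor
    · positivity
    · omega
  · omega
  · have : (255 : Int).toNat = 255 := rfl
    have h := Nat.and_le_left (n := (255:Int).toNat) (m := (-a - 1).toNat)
    omega
  · omega

-- the loop computes 3^n mod 257 (then both sides are masked with & 255)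
set_option maxRecDepth 100000 in
theorem loop_eq_powMod : ∀ n : Nat, n < 256 → proc3Outer n 1 = PySem.Int.powMod 3 n 257 := by
  decide

theorem proc3_eq (a : Int) : proc3 a = proc3_alt a := by
  have h := band255_bounds a
  have hlt : (PySem.Int.band a 255).toNat < 256 := by omega
  show PySem.Int.band (proc3Outer (PySem.Int.band a 255).toNat 1) 255
      = PySem.Int.band (PySem.Int.powMod 3 (PySem.Int.band a 255).toNat 257) 255
  rw [loop_eq_powMod _ hlt]

-- ===== VERDICT (by name: the statement is the Claim_ definition above) =====
theorem proc3_spec : Claim_equal_proc3 := by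
  intro a _
  unfold Spec_proc3
  exact proc3_eq a
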